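-- pv_equiv track=rewrite | github.com/theaveragegeographer/Croatian-Toponymy | scripts/processing/data_cleaner.py | extract_settlement_type
-- ===== SOURCE A (Python) =====
-- def extract_settlement_type(placename):
--     """
--     Extract settlement type from placename if present.
--
--     Common Croatian settlement prefixes/suffixes:
--     - Gornji/Donji (Upper/Lower)
--     - Veliki/Mali (Big/Small)
--     - Stari/Novi (Old/New)
--
--     Args:
--         placename (str): Croatian placename
--
--     Returns:
--         tuple: (base_name, modifier)
--     """
--     modifiers = [
--         'Gornji', 'Donji',
--         'Veliki', 'Mali',
--         'Stari', 'Novi',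
--         'Srednji'
--     ]
--
--     for modifier in modifiers:
--         if placename.startswith(modifier + ' '):
--             base = placename[len(modifier)+1:]
--             return (base, modifier)
--
--     return (placename, None)
-- ===== SOURCE B (Python) =====
-- MODIFIERS = frozenset({'Gornji', 'Donji', 'Veliki', 'Mali', 'Stari', 'Novi', 'Srednji'})
--
--
-- def extract_settlement_type(placename):
--     i = placename.find(' ')
--     if i != -1:
--         first = placename[:i]
--         if first in MODIFIERS:
--             return (placename[i + 1:], first)
--     return (placename, None)
-- ===== Notes on version B (the rewrite author's own statement) =====
-- stated objective: idiomatic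
-- what changed: Replaces A's loop over seven modifiers each tested with startswith by a single scan for the first space followed by one frozenset membership lookup of the first word.
import Mathlib
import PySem

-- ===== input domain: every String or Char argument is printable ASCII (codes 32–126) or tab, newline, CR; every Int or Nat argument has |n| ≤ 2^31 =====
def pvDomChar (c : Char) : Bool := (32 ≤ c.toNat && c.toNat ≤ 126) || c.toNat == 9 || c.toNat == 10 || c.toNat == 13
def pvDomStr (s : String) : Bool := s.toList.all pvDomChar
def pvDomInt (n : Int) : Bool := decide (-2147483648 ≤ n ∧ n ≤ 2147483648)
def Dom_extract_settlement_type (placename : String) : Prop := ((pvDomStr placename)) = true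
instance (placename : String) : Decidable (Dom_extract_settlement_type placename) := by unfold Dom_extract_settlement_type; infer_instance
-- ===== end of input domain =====

-- B replaces A's loop of seven startswith scans by one find(' ') plus a single
-- frozenset lookup of the first word (objective: idiomatic; no speed claim).

-- ===== PORT A =====
-- the 'modifiers' list of A
def estMods : List String := ["Gornji", "Donji", "Veliki", "Mali", "Stari", "Novi", "Srednji"]

-- A's 'for modifier in modifiers' loop, step for step
def estLoop (placename : String) : List String → String × Option String
  | [] => (placename, none)
  | m :: rest =>
    if PySem.Str.startswith placename (m ++ " ") then
      (PySem.Str.slice placename (some (PySem.Str.len m + 1)) none, some m)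
    else estLoop placename rest

def extract_settlement_type (placename : String) : String × Option String :=
  estLoop placename estMods

-- ===== PORT B =====
-- B's module-level frozenset of modifiers
def estModSet : PySem.Set String :=
  PySem.Set.ofList ["Gornji", "Donji", "Veliki", "Mali", "Stari", "Novi", "Srednji"]

def extract_settlement_type_alt (placename : String) : String × Option String :=
  let i := PySem.Str.find placename " "
  if i ≠ -1 then
    let first := PySem.Str.slice placename none (some i)
    if PySem.Set.contains estModSet first then
      (PySem.Str.slice placename (some (i + 1)) none, some first)
    else (placename, none)
  else (placename, none)

-- ===== PRECONDITION & SPEC =====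
def Spec_extract_settlement_type (placename : String) (out : String × Option String) : Prop := out = extract_settlement_type_alt placename
instance (placename : String) (out : String × Option String) : Decidable (Spec_extract_settlement_type placename out) := by unfold Spec_extract_settlement_type; infer_instance

-- ===== CLAIM (what is proved, stated in full; the proofs are below) =====
def Claim_equal_extract_settlement_type : Prop := ∀ (placename : String), Dom_extract_settlement_type placename → Spec_extract_settlement_type placename (extract_settlement_type placename)

-- ===== LEMMAS AND PROOFS =====

-- a one-char list is a prefix iff it is the head
theorem est_singleton_prefix (a : Char) (l : List Char) : [a] <+: l ↔ l[0]? = some a := by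
  cases l with
  | nil => simp
  | cons c r => simp [List.cons_prefix_cons, eq_comm]

-- a one-char list is an infix iff the char is a member
theorem est_singleton_infix (a : Char) (l : List Char) : [a] <:+: l ↔ a ∈ l := by
  constructor
  · intro h
    exact List.singleton_sublist.mp h.sublist
  · intro h
    obtain ⟨s, t, rfl⟩ := List.append_of_mem h
    exact ⟨s, t, by simp⟩

-- characterisation of startswith (m ++ " ") by the first word
theorem est_prefix_space_iff (l cs : List Char) (hl : ' ' ∉ l) :
    (l ++ [' ']) <+: cs ↔ cs.takeWhile (· ≠ ' ') = l ∧ cs.dropWhile (· ≠ ' ') ≠ [] := by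
  induction l generalizing cs with
  | nil =>
    cases cs with
    | nil => simp
    | cons c r =>
      by_cases hc : c = ' '
      · subst hc; simp [List.cons_prefix_cons]
      · simp [List.cons_prefix_cons, hc, Ne.symm hc]
  | cons a l ih =>
    have ha : a ≠ ' ' := fun h => hl (h ▸ List.mem_cons_self)
    have hl' : ' ' ∉ l := fun h => hl (List.mem_cons_of_mem _ h)
    cases cs with
    | nil => simp
    | cons c r =>
      by_cases hc : c = a
      · subst hc
        simp [List.cons_prefix_cons, ha, ih r hl']
      · constructor
        · intro h
          exact absurd (List.cons_prefix_cons.mp h).1 (fun h' => hc h'.symm)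
        · rintro ⟨h1, -⟩
          by_cases hcs : c = ' '
          · simp [hcs] at h1
          · simp [hcs] at h1
            simp_all

-- the head of a dropWhile fails the predicate
theorem est_dropWhile_head (p : Char → Bool) (cs : List Char) :
    ∀ x xs, cs.dropWhile p = x :: xs → p x = false := by
  induction cs with
  | nil => simp
  | cons c r ih =>
    intro x xs h
    by_cases hp : p c
    · exact ih x xs (by simpa [List.dropWhile_cons, hp] using h)
    · rw [List.dropWhile_cons, if_neg hp] at h
      cases h
      simpa using hp

-- find(' ') equals the length of the first word when a space exists, -1 otherwise
theorem est_find_space (cs : List Char) :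
    PySem.Chars.find cs [' '] =
      if cs.dropWhile (· ≠ ' ') = [] then -1 else ((cs.takeWhile (· ≠ ' ')).length : Int) := by
  set t := cs.takeWhile (· ≠ ' ') with ht
  set d := cs.dropWhile (· ≠ ' ') with hd
  have hcs : t ++ d = cs := List.takeWhile_append_dropWhile
  by_cases hde : d = []
  · rw [if_pos hde, PySem.Chars.find_eq_neg_one_iff, est_singleton_infix]
    intro hsp
    have hst : (' ' : Char) ∈ t := by rw [← hcs, hde] at hsp; simpa using hsp
    have := List.mem_takeWhile_imp hst
    simp at this
  · rw [if_neg hde]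
    -- the head of d is a space
    have hdh : d[0]? = some ' ' := by
      cases hdc : d with
      | nil => exact absurd hdc hde
      | cons x xs =>
        have hx := est_dropWhile_head (fun c => decide (c ≠ ' ')) cs x xs (hd ▸ hdc)
        simp at hx
        simp [hx]
    -- t.length is a space position
    have hat : [' '] <+: cs.drop t.length := by
      rw [est_singleton_prefix]
      have : cs.drop t.length = d := by rw [← hcs, List.drop_left]
      rw [this]
      exact hdh
    -- no earlier position is a space
    have hbefore : ∀ j < t.length, ¬ [' '] <+: cs.drop j := by
      intro j hj hpre
      rw [est_singleton_prefix] at hpre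
      rw [List.getElem?_drop] at hpre
      simp only [Nat.add_zero] at hpre
      have hj' : cs[j]? = t[j]? := by
        rw [← hcs]; exact List.getElem?_append_left hj
      rw [hj', List.getElem?_eq_getElem hj] at hpre
      have hmem : t[j] ∈ t := List.getElem_mem hj
      have := List.mem_takeWhile_imp hmem
      simp at this
      simp [this] at hpre
    have hnn : 0 ≤ PySem.Chars.find cs [' '] := by
      rw [PySem.Chars.find_nonneg_iff, est_singleton_infix]
      have : (' ' : Char) ∈ cs.drop t.length := by
        obtain ⟨r, hr⟩ := hat
        rw [← hr]; simp
      exact List.mem_of_mem_drop this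
    obtain ⟨hfpre, hfmin⟩ := PySem.Chars.find_spec hnn
    have h1 : (PySem.Chars.find cs [' ']).toNat ≤ t.length := by
      by_contra h
      exact hfmin t.length (by omega) hat
    have h2 : t.length ≤ (PySem.Chars.find cs [' ']).toNat := by
      by_contra h
      exact hbefore _ (by omega) hfpre
    omega

-- the takeWhile prefix recovered by take of its length
theorem est_take_takeWhile (p : Char → Bool) (l : List Char) :
    l.take (l.takeWhile p).length = l.takeWhile p := by
  have h := List.take_left' (l₁ := l.takeWhile p) (l₂ := l.dropWhile p) rfl
  rw [List.takeWhile_append_dropWhile] at h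
  exact h

-- with no space in the placename, A's loop finds no match
theorem est_loop_nomatch (s : String) (mods : List String)
    (hsp : ∀ m ∈ mods, ' ' ∉ m.toList)
    (hd : s.toList.dropWhile (· ≠ ' ') = []) :
    estLoop s mods = (s, none) := by
  induction mods with
  | nil => rfl
  | cons m rest ih =>
    have hfalse : ¬ PySem.Str.startswith s (m ++ " ") = true := by
      intro htrue
      rw [PySem.Str.startswith_eq] at htrue
      rw [PySem.Chars.startswith_iff] at htrue
      simp only [String.toList_append] at htrue
      have : (" " : String).toList = [' '] := by decide
      rw [this] at htrue
      have := (est_prefix_space_iff m.toList s.toList (hsp m List.mem_cons_self)).mp htrue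
      exact this.2 hd
    rw [estLoop, if_neg hfalse]
    exact ih (fun m hm => hsp m (List.mem_cons_of_mem _ hm))

-- with a space present, A's loop is membership of the first word
theorem est_loop_spec (s w : String) (mods : List String)
    (hsp : ∀ m ∈ mods, ' ' ∉ m.toList)
    (hw : w.toList = s.toList.takeWhile (· ≠ ' '))
    (hd : s.toList.dropWhile (· ≠ ' ') ≠ []) :
    estLoop s mods =
      if w ∈ mods then
        (PySem.Str.slice s (some (((s.toList.takeWhile (· ≠ ' ')).length : Int) + 1)) none, some w)
      else (s, none) := by
  induction mods with
  | nil => simp [estLoop]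
  | cons m rest ih =>
    have hiff : PySem.Str.startswith s (m ++ " ") = true ↔ w = m := by
      rw [PySem.Str.startswith_eq, PySem.Chars.startswith_iff]
      simp only [String.toList_append]
      have h1 : (" " : String).toList = [' '] := by decide
      rw [h1, est_prefix_space_iff m.toList s.toList (hsp m List.mem_cons_self)]
      constructor
      · rintro ⟨h2, -⟩
        exact String.toList_inj.mp (by rw [hw, h2])
      · intro h2
        exact ⟨by rw [← hw, h2], hd⟩
    by_cases hws : w = m
    · rw [estLoop, if_pos (hiff.mpr hws), if_pos (by simp [hws] : w ∈ m :: rest)]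
      have hlen : PySem.Str.len m = ((s.toList.takeWhile (· ≠ ' ')).length : Int) := by
        rw [PySem.Str.len_eq, ← hw, hws]
      rw [hlen, hws]
    · rw [estLoop, if_neg (fun h => hws (hiff.mp h)),
        ih (fun m hm => hsp m (List.mem_cons_of_mem _ hm))]
      simp [hws]

-- ===== VERDICT (by name: the statement is the Claim_ definition above) =====
theorem extract_settlement_type_spec : Claim_equal_extract_settlement_type := by
  intro s _
  unfold Spec_extract_settlement_type extract_settlement_type extract_settlement_type_alt
  have hsp : ∀ m ∈ estMods, ' ' ∉ m.toList := by decide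
  have hfind : PySem.Str.find s " " =
      if s.toList.dropWhile (· ≠ ' ') = [] then -1
      else ((s.toList.takeWhile (· ≠ ' ')).length : Int) := by
    rw [PySem.Str.find_eq]
    have h1 : (" " : String).toList = [' '] := by decide
    rw [h1, est_find_space]
  by_cases hd : s.toList.dropWhile (· ≠ ' ') = []
  · rw [est_loop_nomatch s estMods hsp hd]
    rw [hfind, if_pos hd]
    simp
  · rw [hfind, if_neg hd]
    set t := s.toList.takeWhile (· ≠ ' ') with ht
    set first := PySem.Str.slice s none (some (t.length : Int)) with hf
    have hfw : first.toList = t := by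
      rw [hf, PySem.Str.toList_slice, PySem.Chars.slice_eq_listSlice,
        PySem.List.slice_to_natCast, ht]
      exact est_take_takeWhile _ _
    rw [est_loop_spec s first estMods hsp hfw hd]
    have hmemiff : PySem.Set.contains estModSet first = true ↔ first ∈ estMods := by
      simp [estModSet, estMods, PySem.Set.contains, PySem.Set.mem_ofList]
    by_cases hmem : first ∈ estMods
    · rw [if_pos hmem]
      simp only [← ht]
      rw [if_pos (show ((t.length : Int) ≠ -1) by omega), if_pos (hmemiff.mpr hmem)]
    · rw [if_neg hmem]
      rw [if_pos (show ((t.length : Int) ≠ -1) by omega)]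
      rw [if_neg (fun h => hmem (hmemiff.mp h))]
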